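-- pv_equiv track=rewrite | github.com/jwayj/CheckViolence | flask_py_code/py_02_no_message_eda.py | hh_count
-- ===== SOURCE A (Python) =====
-- def hh_count(df_hh):
--     dict_ = {
--         '1시' : 0 ,'2시' : 0 ,'3시' : 0 ,'4시' : 0 ,'5시' : 0 ,'6시' : 0 ,'7시' : 0 ,'8시' : 0 ,'9시' : 0 ,
--         '10시' : 0 ,'11시' : 0 ,'12시' : 0 ,'13시' : 0 ,'14시' : 0 ,'15시' : 0 ,'16시' : 0 ,'17시' : 0 ,'18시' : 0 ,'19시' : 0 ,
--         '20시' : 0 ,'21시' : 0 ,'22시' : 0 ,'23시' : 0 ,'24시' : 0 ,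
--     }
--     for index,value in df_hh:
--         if str(int(index))+'시' in dict_.keys():
--             dict_[str(int(index))+'시'] = value
--
--     return dict_
-- ===== SOURCE B (Python) =====
-- def hh_count(df_hh):
--     # Build a lookup table over the data once, then generate the result from
--     # the fixed hour range 1..24 with defaulting lookups (last-wins preserved).
--     source = {str(int(index)) + '시': value for index, value in df_hh}
--     return {f'{h}시': source.get(f'{h}시', 0) for h in range(1, 25)}
-- ===== Notes on version B (the rewrite author's own statement) =====
-- stated objective: simpler
-- what changed: Instead of conditionally overwriting entries of a pre-zeroed 24-key dict during the data pass, B builds an unconditional last-wins index of the data and then generates the result by iterating the fixed hour range 1..24 with defaulting lookups.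
import Mathlib
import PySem

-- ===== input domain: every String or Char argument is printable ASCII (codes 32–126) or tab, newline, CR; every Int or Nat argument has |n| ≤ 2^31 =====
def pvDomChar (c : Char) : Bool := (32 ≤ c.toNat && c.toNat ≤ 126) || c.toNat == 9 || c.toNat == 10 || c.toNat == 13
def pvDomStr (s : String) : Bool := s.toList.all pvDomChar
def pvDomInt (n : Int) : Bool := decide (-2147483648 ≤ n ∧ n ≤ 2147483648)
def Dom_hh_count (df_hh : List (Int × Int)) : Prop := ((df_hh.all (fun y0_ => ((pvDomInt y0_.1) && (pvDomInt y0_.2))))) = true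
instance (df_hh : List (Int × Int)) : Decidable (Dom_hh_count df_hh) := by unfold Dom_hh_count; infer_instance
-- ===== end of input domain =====

-- B builds a last-wins index of the data and then generates the result from the fixed
-- hour range 1..24 with defaulting lookups, instead of conditionally overwriting a
-- pre-zeroed fixed dict during the data pass (objective: simpler decomposition).

-- ===== PORT A =====
-- int(index) on an int is the identity, so str(int(index)) is ported as toStr.
def hh_count (df_hh : List (Int × Int)) : List (String × Int) :=
  let dict0 : PySem.Dict String Int := PySem.Dict.ofList
    [("1시", 0), ("2시", 0), ("3시", 0), ("4시", 0), ("5시", 0), ("6시", 0), ("7시", 0),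
     ("8시", 0), ("9시", 0), ("10시", 0), ("11시", 0), ("12시", 0), ("13시", 0), ("14시", 0),
     ("15시", 0), ("16시", 0), ("17시", 0), ("18시", 0), ("19시", 0), ("20시", 0), ("21시", 0),
     ("22시", 0), ("23시", 0), ("24시", 0)]
  let d := df_hh.foldl (fun d p =>
    if d.contains (PySem.Int.toStr p.1 ++ "시") then d.insert (PySem.Int.toStr p.1 ++ "시") p.2
    else d) dict0
  d.items

-- ===== PORT B =====
def hh_count_alt (df_hh : List (Int × Int)) : List (String × Int) :=
  let source : PySem.Dict String Int :=
    df_hh.foldl (fun d p => d.insert (PySem.Int.toStr p.1 ++ "시") p.2) PySem.Dict.empty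
  (PySem.List.pyRange 1 25 1).map (fun h =>
    (PySem.Int.toStr h ++ "시", source.getD (PySem.Int.toStr h ++ "시") 0))

-- ===== PRECONDITION & SPEC =====
def Spec_hh_count (df_hh : List (Int × Int)) (out : List (String × Int)) : Prop := out = hh_count_alt df_hh
instance (df_hh : List (Int × Int)) (out : List (String × Int)) : Decidable (Spec_hh_count df_hh out) := by unfold Spec_hh_count; infer_instance

-- ===== CLAIM (what is proved, stated in full; the proofs are below) =====
def Claim_equal_hh_count : Prop := ∀ (df_hh : List (Int × Int)), Dom_hh_count df_hh → Spec_hh_count df_hh (hh_count df_hh)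

-- ===== LEMMAS AND PROOFS =====

-- the value the last data row with key k wrote, starting from v0
def hhLast (df : List (Int × Int)) (k : String) (v0 : Int) : Int :=
  df.foldl (fun acc p => if PySem.Int.toStr p.1 ++ "시" = k then p.2 else acc) v0

def hhDict0 : PySem.Dict String Int := PySem.Dict.ofList
    [("1시", 0), ("2시", 0), ("3시", 0), ("4시", 0), ("5시", 0), ("6시", 0), ("7시", 0),
     ("8시", 0), ("9시", 0), ("10시", 0), ("11시", 0), ("12시", 0), ("13시", 0), ("14시", 0),
     ("15시", 0), ("16시", 0), ("17시", 0), ("18시", 0), ("19시", 0), ("20시", 0), ("21시", 0),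
     ("22시", 0), ("23시", 0), ("24시", 0)]

def hhStepA (d : PySem.Dict String Int) (p : Int × Int) : PySem.Dict String Int :=
  if d.contains (PySem.Int.toStr p.1 ++ "시") then d.insert (PySem.Int.toStr p.1 ++ "시") p.2
  else d

lemma hhA_keys (df : List (Int × Int)) (d : PySem.Dict String Int) :
    (df.foldl hhStepA d).keys = d.keys := by
  induction df generalizing d with
  | nil => rfl
  | cons p t ih =>
    simp only [List.foldl_cons]
    rw [ih]
    unfold hhStepA
    split
    · next hc => exact PySem.Dict.keys_insert_of_contains _ _ hc
    · rfl

lemma hhA_getD (df : List (Int × Int)) (d : PySem.Dict String Int) (k : String)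
    (hk : d.contains k = true) :
    (df.foldl hhStepA d).getD k 0 = hhLast df k (d.getD k 0) := by
  induction df generalizing d with
  | nil => rfl
  | cons p t ih =>
    simp only [List.foldl_cons]
    unfold hhLast
    simp only [List.foldl_cons]
    by_cases hc : d.contains (PySem.Int.toStr p.1 ++ "시") = true
    · have hstep : hhStepA d p = d.insert (PySem.Int.toStr p.1 ++ "시") p.2 := by
        unfold hhStepA; rw [if_pos hc]
      rw [hstep]
      have hk' : (d.insert (PySem.Int.toStr p.1 ++ "시") p.2).contains k = true := by
        rw [PySem.Dict.contains_insert]; simp [hk]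
      rw [ih _ hk', PySem.Dict.getD_insert]
      by_cases h : PySem.Int.toStr p.1 ++ "시" = k
      · rw [if_pos h, if_pos h.symm]; rfl
      · rw [if_neg h, if_neg (mt Eq.symm h)]; rfl
    · simp only [Bool.not_eq_true] at hc
      have hstep : hhStepA d p = d := by
        unfold hhStepA; rw [if_neg (by simp [hc])]
      rw [hstep]
      have hne : ¬ (PySem.Int.toStr p.1 ++ "시" = k) := by
        intro h; rw [h, hk] at hc; cases hc
      rw [ih _ hk, if_neg hne]
      rfl

lemma hhB_getD (df : List (Int × Int)) (d : PySem.Dict String Int) (k : String) :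
    (df.foldl (fun d p => d.insert (PySem.Int.toStr p.1 ++ "시") p.2) d).getD k 0
      = hhLast df k (d.getD k 0) := by
  induction df generalizing d with
  | nil => rfl
  | cons p t ih =>
    simp only [List.foldl_cons]
    unfold hhLast
    simp only [List.foldl_cons]
    rw [ih, PySem.Dict.getD_insert]
    by_cases h : PySem.Int.toStr p.1 ++ "시" = k
    · rw [if_pos h, if_pos h.symm]; rfl
    · rw [if_neg h, if_neg (mt Eq.symm h)]; rfl

lemma hhDict0_keys : hhDict0.keys = (PySem.List.pyRange 1 25 1).map (fun h => PySem.Int.toStr h ++ "시") := by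
  decide

lemma hhDict0_nodup : hhDict0.keys.Nodup := by decide

lemma hhDict0_getD (k : String) (hk : k ∈ hhDict0.keys) : hhDict0.getD k 0 = 0 := by
  fin_cases hk <;> decide

-- ===== VERDICT (by name: the statement is the Claim_ definition above) =====
theorem hh_count_spec : Claim_equal_hh_count := by
  intro df _
  unfold Spec_hh_count hh_count hh_count_alt
  show (df.foldl hhStepA hhDict0).items =
    List.map (fun h => (PySem.Int.toStr h ++ "시",
      (List.foldl (fun d p => d.insert (PySem.Int.toStr p.1 ++ "시") p.2) PySem.Dict.empty df).getD
        (PySem.Int.toStr h ++ "시") 0)) (PySem.List.pyRange 1 25 1)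
  have hnd : (df.foldl hhStepA hhDict0).keys.Nodup := by
    rw [hhA_keys]; exact hhDict0_nodup
  rw [PySem.Dict.items_eq_map_keys _ hnd 0, hhA_keys, hhDict0_keys, List.map_map]
  apply List.map_congr_left
  intro h hmem
  have hkmem : (PySem.Int.toStr h ++ "시") ∈ hhDict0.keys := by
    rw [hhDict0_keys]; exact List.mem_map_of_mem hmem
  have hc : hhDict0.contains (PySem.Int.toStr h ++ "시") = true :=
    (PySem.Dict.contains_iff_mem_keys _ _).2 hkmem
  simp only [Function.comp]
  rw [hhA_getD df hhDict0 _ hc, hhDict0_getD _ hkmem, hhB_getD, PySem.Dict.getD_empty]
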